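-- pv_equiv track=rewrite | github.com/Naoldaba/codeForces | E_m_Lucky_Numbers.py | lucky_number
-- ===== SOURCE A (Python) =====
-- def lucky_number(n, a):
--     res = [-1] * n  # Initialize the result list with -1
--
--     # Create a dictionary to store the minimum index for each value
--     min_index = {}
--
--     # Iterate through the array
--     for i, num in enumerate(a):
--         # Update the minimum index for the current value
--         if num in min_index:
--             min_index[num] = min(min_index[num], i)
--         else:
--             min_index[num] = i
--
--         # Iterate through each possible length m
--         for m in range(1, n + 1):
--             # Check if the current value has occurred in all subarrays of length m
--             if num in min_index and min_index[num] <= i - m + 1: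
--                 # Update the m-lucky number if the condition is met
--                 res[m - 1] = num
--
--     return res
-- ===== SOURCE B (Python) =====
-- def lucky_number(n, a):
--     size = n if n > 0 else 0
--     res = [-1] * size
--     # first pass: first-occurrence index of each value, and d[i] = i - first[a[i]]
--     first = {}
--     d = []
--     for i, num in enumerate(a):
--         if num not in first:
--             first[num] = i
--         d.append(i - first[num])
--     # second pass, descending i: res[k] (k <= d[i], capped) is owned by the
--     # largest such i, so fill unfilled cells with a range pointer.
--     filled = 0
--     for i, num, di in reversed(list(zip(range(len(a)), a, d))):
--         hi = di if di < size else size - 1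
--         for k in range(filled, hi + 1):
--             res[k] = num
--         if hi + 1 > filled:
--             filled = hi + 1
--     return res
-- ===== Notes on version B (the rewrite author's own statement) =====
-- stated objective: faster
-- what changed: A rescans every length m for every position (O(n*len(a))); B precomputes d[i] = i - first_occurrence(a[i]) in one pass, then walks i descending with a filled-up-to pointer so every result cell is written exactly once (O(n + len(a))).
import Mathlib
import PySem

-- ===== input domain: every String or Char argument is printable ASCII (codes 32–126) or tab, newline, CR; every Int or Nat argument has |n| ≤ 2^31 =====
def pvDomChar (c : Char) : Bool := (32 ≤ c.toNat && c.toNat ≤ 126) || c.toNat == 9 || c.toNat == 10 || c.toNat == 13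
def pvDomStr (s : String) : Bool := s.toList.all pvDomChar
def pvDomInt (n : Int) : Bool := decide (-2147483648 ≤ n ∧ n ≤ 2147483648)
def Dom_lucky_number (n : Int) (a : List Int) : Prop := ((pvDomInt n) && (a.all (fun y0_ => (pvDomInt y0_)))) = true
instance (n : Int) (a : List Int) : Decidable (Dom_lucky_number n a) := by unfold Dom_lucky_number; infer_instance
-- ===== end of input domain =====

-- B replaces A's per-position rescan of every length m by a first-occurrence pass plus one
-- descending fill with a filled-up-to pointer; objective: faster (asymptotic, O(n+len a) vs O(n*len a)).


-- ===== PORT A =====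
-- one iteration of A's outer loop: update min_index, then for m in range(1, n+1) conditionally set res[m-1]
def aStep (n : Int) (st : List Int × PySem.Dict Int Int) (p : Int × Int) : List Int × PySem.Dict Int Int :=
  let i := p.1
  let num := p.2
  let mi := match st.2.get? num with
    | some v => st.2.insert num (min v i)
    | none => st.2.insert num i
  let res := (PySem.List.pyRange 1 (n+1) 1).foldl (fun r m =>
    match mi.get? num with
    | some v => if v ≤ i - m + 1 then r.set (m-1).toNat num else r
    | none => r) st.1
  (res, mi)

def lucky_number (n : Int) (a : List Int) : List Int :=
  ((PySem.List.enumerate a).foldl (aStep n) (PySem.List.pyRepeat [-1] n, PySem.Dict.empty)).1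

-- ===== PORT B =====
-- first pass: record first occurrence, append d[i] = i - first[a[i]]
-- (first[num] is read with .getD 0 where the key is guaranteed present — Python's first[num])
def bFirstStep (st : PySem.Dict Int Int × List Int) (p : Int × Int) : PySem.Dict Int Int × List Int :=
  let i := p.1
  let num := p.2
  let first := if st.1.contains num then st.1 else st.1.insert num i
  (first, st.2 ++ [i - (first.get? num).getD 0])

-- one iteration of B's descending loop over a triple (i, num, di): range-fill res[filled..hi], bump the pointer
def bFillStep (size : Int) (st : List Int × Int) (t : Int × Int × Int) : List Int × Int :=
  let num := t.2.1
  let di := t.2.2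
  let hi := if di < size then di else size - 1
  let res := (PySem.List.pyRange st.2 (hi+1) 1).foldl (fun r k => r.set k.toNat num) st.1
  let filled := if hi + 1 > st.2 then hi + 1 else st.2
  (res, filled)

def lucky_number_alt (n : Int) (a : List Int) : List Int :=
  let size : Int := if n > 0 then n else 0
  let fd := (PySem.List.enumerate a).foldl bFirstStep (PySem.Dict.empty, [])
  let triples := (PySem.List.pyRange 0 a.length 1).zip (a.zip fd.2)
  (triples.reverse.foldl (bFillStep size) (PySem.List.pyRepeat [-1] size, 0)).1

-- ===== PRECONDITION & SPEC =====
def Spec_lucky_number (n : Int) (a : List Int) (out : List Int) : Prop := out = lucky_number_alt n a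
instance (n : Int) (a : List Int) (out : List Int) : Decidable (Spec_lucky_number n a out) := by unfold Spec_lucky_number; infer_instance

-- ===== CLAIM (what is proved, stated in full; the proofs are below) =====
def Claim_equal_lucky_number : Prop := ∀ (n : Int) (a : List Int), Dom_lucky_number n a → Spec_lucky_number n a (lucky_number n a)

-- ===== LEMMAS AND PROOFS =====

-- d-values of B's first pass, and the common cell value: res[k] is the last (num, d) pair with k ≤ d
def dList (a : List Int) : List Int := ((PySem.List.enumerate a).foldl bFirstStep (PySem.Dict.empty, [])).2

def cellv (ps : List (Int × Int)) (k : Int) : Int :=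
  ps.foldl (fun acc p => if k ≤ p.2 then p.1 else acc) (-1)

-- first-occurrence value used at index a.length when y arrives
def fv (a : List Int) (y : Int) : Int :=
  match PySem.List.index? a y with
  | some v => (v : Int)
  | none => (a.length : Int)


-- ---- generic helpers about the two fill loops ----

-- A's inner loop preserves the list length
lemma lenA (v i num : Int) (l : List Int) :
    ∀ res : List Int,
    (l.foldl (fun r m => if v ≤ i - m + 1 then r.set (m-1).toNat num else r) res).length = res.length := by
  induction l with
  | nil => intro res; rfl
  | cons m t ih =>
      intro res
      simp only [List.foldl_cons]
      rw [ih]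
      split <;> simp

-- B's inner loop preserves the list length
lemma lenB (num : Int) (l : List Int) :
    ∀ res : List Int,
    (l.foldl (fun r k => r.set k.toNat num) res).length = res.length := by
  induction l with
  | nil => intro res; rfl
  | cons m t ih =>
      intro res
      simp only [List.foldl_cons]
      rw [ih]
      simp

-- cell-level description of A's inner loop over range(1, b)
lemma foldA_get (v i num b : Int) :
    ∀ (fuel : Nat) (lo : Int) (res : List Int) (k : Nat), (b - lo).toNat = fuel → 1 ≤ lo →
    ((PySem.List.pyRange lo b 1).foldl (fun r m => if v ≤ i - m + 1 then r.set (m-1).toNat num else r) res)[k]? =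
      if lo ≤ (k:Int)+1 ∧ (k:Int)+1 < b ∧ v ≤ i - (k:Int) ∧ k < res.length then some num else res[k]? := by
  intro fuel
  induction fuel with
  | zero =>
      intro lo res k hfuel hlo
      rw [PySem.List.pyRange_one_eq_nil (by omega)]
      simp only [List.foldl_nil]
      rw [if_neg]
      rintro ⟨h1, h2, _, _⟩; omega
  | succ f ih =>
      intro lo res k hfuel hlo
      rw [PySem.List.pyRange_one_cons (by omega)]
      simp only [List.foldl_cons]
      rw [ih (lo+1) _ k (by omega) (by omega)]
      by_cases hk : (k:Int) + 1 = lo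
      · have hset : (lo - 1).toNat = k := by omega
        rw [if_neg (by rintro ⟨h1, _, _, _⟩; omega)]
        split
        · rw [hset, List.getElem?_set, if_pos rfl]
          rename_i hcond
          by_cases hklen : k < res.length
          · rw [if_pos hklen, if_pos ⟨by omega, by omega, by omega, hklen⟩]
          · rw [if_neg hklen, if_neg (by rintro ⟨_, _, _, h⟩; exact hklen h),
                List.getElem?_eq_none (by omega)]
        · rename_i hcond
          rw [if_neg (by rintro ⟨_, _, h3, _⟩; exact hcond (by omega))]
      · have hne : ¬ ((lo - 1).toNat = k) := by omega
        have hres1 : (if v ≤ i - lo + 1 then res.set (lo-1).toNat num else res)[k]? = res[k]? := by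
          split
          · rw [List.getElem?_set, if_neg hne]
          · rfl
        have hlen1 : (if v ≤ i - lo + 1 then res.set (lo-1).toNat num else res).length = res.length := by
          split <;> simp
        rw [hlen1, hres1]
        by_cases hc : lo ≤ (k:Int)+1 ∧ (k:Int)+1 < b ∧ v ≤ i - (k:Int) ∧ k < res.length
        · rw [if_pos ⟨by omega, hc.2.1, hc.2.2.1, hc.2.2.2⟩, if_pos hc]
        · rw [if_neg (by rintro ⟨h1, h2, h3, h4⟩; exact hc ⟨by omega, h2, h3, h4⟩), if_neg hc]

-- cell-level description of B's inner loop over range(filled, hi+1)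
lemma foldB_get (num b : Int) :
    ∀ (fuel : Nat) (lo : Int) (res : List Int) (k : Nat), (b - lo).toNat = fuel → 0 ≤ lo →
    ((PySem.List.pyRange lo b 1).foldl (fun r j => r.set j.toNat num) res)[k]? =
      if lo ≤ (k:Int) ∧ (k:Int) < b ∧ k < res.length then some num else res[k]? := by
  intro fuel
  induction fuel with
  | zero =>
      intro lo res k hfuel hlo
      rw [PySem.List.pyRange_one_eq_nil (by omega)]
      simp only [List.foldl_nil]
      rw [if_neg]
      rintro ⟨h1, h2, _⟩; omega
  | succ f ih =>
      intro lo res k hfuel hlo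
      rw [PySem.List.pyRange_one_cons (by omega)]
      simp only [List.foldl_cons]
      rw [ih (lo+1) _ k (by omega) (by omega)]
      by_cases hk : (k:Int) = lo
      · have hset : lo.toNat = k := by omega
        rw [if_neg (by rintro ⟨h1, _, _⟩; omega), hset, List.getElem?_set, if_pos rfl]
        by_cases hklen : k < res.length
        · rw [if_pos hklen, if_pos ⟨by omega, by omega, hklen⟩]
        · rw [if_neg hklen, if_neg (by rintro ⟨_, _, h⟩; exact hklen h),
              List.getElem?_eq_none (by omega)]
      · have hne : ¬ (lo.toNat = k) := by omega
        rw [List.getElem?_set, if_neg hne, List.length_set]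
        by_cases hc : lo ≤ (k:Int) ∧ (k:Int) < b ∧ k < res.length
        · rw [if_pos ⟨by omega, hc.2.1, hc.2.2⟩, if_pos hc]
        · rw [if_neg (by rintro ⟨h1, h2, h3⟩; exact hc ⟨by omega, h2, h3⟩), if_neg hc]

-- ---- concat decompositions of the folds over enumerate ----

lemma enum_concat (a : List Int) (y : Int) :
    PySem.List.enumerate (a ++ [y]) = PySem.List.enumerate a ++ [((a.length : Int), y)] := by
  rw [PySem.List.enumerate_append a [y] 0]
  simp [PySem.List.enumerate_cons, PySem.List.enumerate_nil]

lemma bFold_concat (a : List Int) (y : Int) :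
    (PySem.List.enumerate (a ++ [y])).foldl bFirstStep (PySem.Dict.empty, []) =
      bFirstStep ((PySem.List.enumerate a).foldl bFirstStep (PySem.Dict.empty, [])) ((a.length : Int), y) := by
  rw [enum_concat, List.foldl_append]
  rfl

lemma aFold_concat (n : Int) (a : List Int) (y : Int) :
    (PySem.List.enumerate (a ++ [y])).foldl (aStep n) (PySem.List.pyRepeat [-1] n, PySem.Dict.empty) =
      aStep n ((PySem.List.enumerate a).foldl (aStep n) (PySem.List.pyRepeat [-1] n, PySem.Dict.empty)) ((a.length : Int), y) := by
  rw [enum_concat, List.foldl_append]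
  rfl

-- ---- the dictionaries of both programs hold first-occurrence indices ----

lemma bFirst_get (a : List Int) :
    ∀ x : Int, ((PySem.List.enumerate a).foldl bFirstStep (PySem.Dict.empty, [])).1.get? x
      = (PySem.List.index? a x).map (fun v => ((v : Nat) : Int)) := by
  induction a using List.reverseRecOn with
  | nil =>
      intro x
      rw [PySem.List.enumerate_nil]
      rw [List.foldl_nil, PySem.Dict.get?_empty, (PySem.List.index?_eq_none_iff [] x).2 (List.not_mem_nil)]
      rfl
  | append_singleton a y ih =>
      intro x
      rw [bFold_concat]
      simp only [bFirstStep]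
      by_cases hy : y ∈ a
      · have hcon : ((PySem.List.enumerate a).foldl bFirstStep (PySem.Dict.empty, [])).1.contains y = true := by
          cases hc : ((PySem.List.enumerate a).foldl bFirstStep (PySem.Dict.empty, [])).1.contains y
          · exfalso
            have h0 := (PySem.Dict.get?_eq_none_iff_contains _ y).2 hc
            rw [ih y] at h0
            cases h2 : PySem.List.index? a y with
            | none => exact ((PySem.List.index?_eq_none_iff a y).1 h2) hy
            | some v => rw [h2] at h0; simp at h0
          · rfl
        rw [if_pos hcon, ih x]
        by_cases hx : x ∈ a
        · rw [PySem.List.index?_append_of_mem [y] hx]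
        · have hxy : x ≠ y := fun h => hx (h ▸ hy)
          rw [(PySem.List.index?_eq_none_iff a x).2 hx,
            (PySem.List.index?_eq_none_iff (a ++ [y]) x).2 (by
              intro hmem
              rcases List.mem_append.1 hmem with h | h
              · exact hx h
              · exact hxy (List.mem_singleton.1 h))]
      · have hnone : ((PySem.List.enumerate a).foldl bFirstStep (PySem.Dict.empty, [])).1.get? y = none := by
          rw [ih y, (PySem.List.index?_eq_none_iff a y).2 hy]; rfl
        have hcon := (PySem.Dict.get?_eq_none_iff_contains _ y).1 hnone
        rw [if_neg (by rw [hcon]; exact Bool.false_ne_true)]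
        by_cases hx : x = y
        · subst hx
          rw [PySem.Dict.get?_insert_self, PySem.List.index?_append_singleton_self a x hy]
          rfl
        · rw [PySem.Dict.get?_insert_of_ne _ _ hx, ih x]
          by_cases hxa : x ∈ a
          · rw [PySem.List.index?_append_of_mem [y] hxa]
          · rw [(PySem.List.index?_eq_none_iff a x).2 hxa,
              (PySem.List.index?_eq_none_iff (a ++ [y]) x).2 (by
                intro hmem
                rcases List.mem_append.1 hmem with h | h
                · exact hxa h
                · exact hx (List.mem_singleton.1 h))]

lemma aDict_get (n : Int) (a : List Int) :
    ∀ x : Int, ((PySem.List.enumerate a).foldl (aStep n) (PySem.List.pyRepeat [-1] n, PySem.Dict.empty)).2.get? x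
      = (PySem.List.index? a x).map (fun v => ((v : Nat) : Int)) := by
  induction a using List.reverseRecOn with
  | nil =>
      intro x
      rw [PySem.List.enumerate_nil]
      rw [List.foldl_nil, PySem.Dict.get?_empty, (PySem.List.index?_eq_none_iff [] x).2 (List.not_mem_nil)]
      rfl
  | append_singleton a y ih =>
      intro x
      rw [aFold_concat]
      simp only [aStep]
      by_cases hy : y ∈ a
      · cases h2 : PySem.List.index? a y with
        | none => exact absurd ((PySem.List.index?_eq_none_iff a y).1 h2) (by simp [hy])
        | some v =>
          obtain ⟨hvlt, -, -⟩ := PySem.List.getElem_of_index?_eq_some h2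
          have hst : ((PySem.List.enumerate a).foldl (aStep n) (PySem.List.pyRepeat [-1] n, PySem.Dict.empty)).2.get? y
              = some ((v : Int)) := by rw [ih y, h2]; rfl
          simp only [hst]
          have hmin : min ((v : Nat) : Int) ((a.length : Nat) : Int) = ((v : Nat) : Int) := by
            apply min_eq_left; exact_mod_cast le_of_lt hvlt
          by_cases hx : x = y
          · subst hx
            rw [hmin, PySem.Dict.get?_insert_self, PySem.List.index?_append_of_mem [x] hy, h2]
            rfl
          · rw [PySem.Dict.get?_insert_of_ne _ _ hx, ih x]
            by_cases hxa : x ∈ a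
            · rw [PySem.List.index?_append_of_mem [y] hxa]
            · rw [(PySem.List.index?_eq_none_iff a x).2 hxa,
                (PySem.List.index?_eq_none_iff (a ++ [y]) x).2 (by
                  intro hmem
                  rcases List.mem_append.1 hmem with h | h
                  · exact hxa h
                  · exact hxa (by rw [List.mem_singleton.1 h]; exact hy))]
      · have hst : ((PySem.List.enumerate a).foldl (aStep n) (PySem.List.pyRepeat [-1] n, PySem.Dict.empty)).2.get? y
            = none := by rw [ih y, (PySem.List.index?_eq_none_iff a y).2 hy]; rfl
        simp only [hst]
        by_cases hx : x = y
        · subst hx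
          rw [PySem.Dict.get?_insert_self, PySem.List.index?_append_singleton_self a x hy]
          rfl
        · rw [PySem.Dict.get?_insert_of_ne _ _ hx, ih x]
          by_cases hxa : x ∈ a
          · rw [PySem.List.index?_append_of_mem [y] hxa]
          · rw [(PySem.List.index?_eq_none_iff a x).2 hxa,
              (PySem.List.index?_eq_none_iff (a ++ [y]) x).2 (by
                intro hmem
                rcases List.mem_append.1 hmem with h | h
                · exact hxa h
                · exact hx (List.mem_singleton.1 h))]

lemma fv_map (a : List Int) (y : Int) :
    (PySem.List.index? (a ++ [y]) y).map (fun v => ((v : Nat) : Int)) = some (fv a y) := by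
  unfold fv
  by_cases hy : y ∈ a
  · rw [PySem.List.index?_append_of_mem [y] hy]
    cases h2 : PySem.List.index? a y with
    | none => exact absurd ((PySem.List.index?_eq_none_iff a y).1 h2) (by simp [hy])
    | some v => rfl
  · rw [PySem.List.index?_append_singleton_self a y hy, (PySem.List.index?_eq_none_iff a y).2 hy]
    rfl

lemma dList_length (a : List Int) : (dList a).length = a.length := by
  induction a using List.reverseRecOn with
  | nil => rfl
  | append_singleton a y ih =>
      unfold dList
      rw [bFold_concat]
      simp only [bFirstStep, List.length_append, List.length_singleton]
      unfold dList at ih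
      rw [ih]

lemma dList_concat (a : List Int) (y : Int) :
    dList (a ++ [y]) = dList a ++ [(a.length : Int) - fv a y] := by
  unfold dList
  rw [bFold_concat]
  simp only [bFirstStep]
  congr 1
  congr 1
  congr 1
  by_cases hy : y ∈ a
  · have hcon : ((PySem.List.enumerate a).foldl bFirstStep (PySem.Dict.empty, [])).1.contains y = true := by
      cases hc : ((PySem.List.enumerate a).foldl bFirstStep (PySem.Dict.empty, [])).1.contains y
      · exfalso
        have h0 := (PySem.Dict.get?_eq_none_iff_contains _ y).2 hc
        rw [bFirst_get a y] at h0
        cases h2 : PySem.List.index? a y with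
        | none => exact ((PySem.List.index?_eq_none_iff a y).1 h2) hy
        | some v => rw [h2] at h0; simp at h0
      · rfl
    rw [if_pos hcon, bFirst_get a y]
    unfold fv
    cases h2 : PySem.List.index? a y with
    | none => exact absurd ((PySem.List.index?_eq_none_iff a y).1 h2) (by simp [hy])
    | some v => rfl
  · have hnone : ((PySem.List.enumerate a).foldl bFirstStep (PySem.Dict.empty, [])).1.get? y = none := by
      rw [bFirst_get a y, (PySem.List.index?_eq_none_iff a y).2 hy]; rfl
    have hcon := (PySem.Dict.get?_eq_none_iff_contains _ y).1 hnone
    rw [if_neg (by rw [hcon]; exact Bool.false_ne_true), PySem.Dict.get?_insert_self]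
    unfold fv
    rw [(PySem.List.index?_eq_none_iff a y).2 hy]
    rfl

lemma cellv_concat (ps : List (Int × Int)) (p : Int × Int) (k : Int) :
    cellv (ps ++ [p]) k = if k ≤ p.2 then p.1 else cellv ps k := by
  unfold cellv
  rw [List.foldl_append]
  rfl

lemma cellv_eq_find (ps : List (Int × Int)) (k : Int) :
    cellv ps k = (match ps.reverse.find? (fun p => decide (k ≤ p.2)) with
      | some p => p.1
      | none => -1) := by
  induction ps using List.reverseRecOn with
  | nil => rfl
  | append_singleton ps p ih =>
      rw [cellv_concat, List.reverse_append]
      simp only [List.reverse_singleton, List.singleton_append, List.find?_cons]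
      by_cases hp : k ≤ p.2
      · rw [if_pos hp]
        simp only [decide_eq_true hp]
      · rw [if_neg hp, ih]
        simp only [decide_eq_false hp]

lemma aMain (n : Int) (a : List Int) :
    (((PySem.List.enumerate a).foldl (aStep n) (PySem.List.pyRepeat [-1] n, PySem.Dict.empty)).1.length = n.toNat)
    ∧ ∀ k : Nat, k < n.toNat →
      ((PySem.List.enumerate a).foldl (aStep n) (PySem.List.pyRepeat [-1] n, PySem.Dict.empty)).1[k]?
        = some (cellv (a.zip (dList a)) (k : Int)) := by
  induction a using List.reverseRecOn with
  | nil =>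
      rw [PySem.List.enumerate_nil, List.foldl_nil, PySem.List.pyRepeat_singleton]
      refine ⟨List.length_replicate, fun k hk => ?_⟩
      rw [List.getElem?_replicate, if_pos hk]
      rfl
  | append_singleton a y ih =>
      obtain ⟨hlen, hcell⟩ := ih
      have hdict : (aStep n ((PySem.List.enumerate a).foldl (aStep n) (PySem.List.pyRepeat [-1] n, PySem.Dict.empty))
          ((a.length : Int), y)).2.get? y = some (fv a y) := by
        rw [← aFold_concat, aDict_get n (a ++ [y]) y, fv_map]
      rw [aFold_concat]
      simp only [aStep] at hdict ⊢
      simp only [hdict]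
      constructor
      · rw [lenA]; exact hlen
      · intro k hk
        rw [foldA_get (fv a y) (a.length : Int) y (n+1) ((n+1)-1).toNat 1 _ k rfl le_rfl]
        rw [dList_concat, List.zip_append (dList_length a).symm]
        simp only [List.zip_cons_cons, List.zip_nil_right]
        rw [cellv_concat]
        have hklen : k < ((PySem.List.enumerate a).foldl (aStep n) (PySem.List.pyRepeat [-1] n, PySem.Dict.empty)).1.length := by
          rw [hlen]; exact hk
        by_cases hfv : fv a y ≤ (a.length : Int) - (k : Int)
        · rw [if_pos ⟨by omega, by omega, hfv, hklen⟩, if_pos (by omega)]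
        · rw [if_neg (by rintro ⟨-, -, h, -⟩; exact hfv h), if_neg (by omega), hcell k hk]

-- ---- B's descending fill: first hit from the right ----

lemma bLoopLen (size : Int) :
    ∀ (ts : List (Int × Int × Int)) (res : List Int) (filled : Int),
    ((ts.foldl (bFillStep size) (res, filled)).1).length = res.length := by
  intro ts
  induction ts with
  | nil => intro res filled; rfl
  | cons t ts ih =>
      intro res filled
      simp only [List.foldl_cons]
      rw [ih]
      simp only [bFillStep]
      rw [lenB]

lemma bLoop (size : Int) :
    ∀ (ts : List (Int × Int × Int)) (res : List Int) (filled : Int) (k : Nat),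
    0 ≤ filled → k < res.length → (k:Int) < size →
    ((ts.foldl (bFillStep size) (res, filled)).1)[k]? =
      if (k:Int) < filled then res[k]?
      else (match ts.find? (fun t => decide ((k:Int) ≤ t.2.2)) with
        | some t => some t.2.1
        | none => res[k]?) := by
  intro ts
  induction ts with
  | nil =>
      intro res filled k hf hk hks
      simp only [List.foldl_nil, List.find?_nil]
      split <;> rfl
  | cons t ts ih =>
      intro res filled k hf hk hks
      simp only [List.foldl_cons, List.find?_cons]
      simp only [bFillStep]
      set hi := if t.2.2 < size then t.2.2 else size - 1 with hhi
      set res1 := (PySem.List.pyRange filled (hi+1) 1).foldl (fun r j => r.set j.toNat t.2.1) res with hres1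
      set filled1 := if hi + 1 > filled then hi + 1 else filled with hfilled1
      have hlen1 : res1.length = res.length := by rw [hres1, lenB]
      have hget1 : res1[k]? = if filled ≤ (k:Int) ∧ (k:Int) < hi + 1 ∧ k < res.length then some t.2.1 else res[k]? := by
        rw [hres1, foldB_get t.2.1 (hi+1) ((hi+1) - filled).toNat filled res k rfl hf]
      have hf1 : 0 ≤ filled1 := by rw [hfilled1]; split <;> omega
      rw [ih res1 filled1 k hf1 (by rw [hlen1]; exact hk) hks]
      have hhik : ((k:Int) ≤ hi) ↔ ((k:Int) ≤ t.2.2) := by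
        rw [hhi]; split <;> omega
      by_cases hkf : (k:Int) < filled
      · have : (k:Int) < filled1 := by rw [hfilled1]; split <;> omega
        rw [if_pos this, if_pos hkf, hget1, if_neg (by rintro ⟨h, -, -⟩; omega)]
      · rw [if_neg hkf]
        by_cases hkd : (k:Int) ≤ t.2.2
        · have hkhi : (k:Int) ≤ hi := hhik.2 hkd
          have : (k:Int) < filled1 := by rw [hfilled1]; split <;> omega
          rw [if_pos this, hget1, if_pos ⟨by omega, by omega, hk⟩]
          simp only [decide_eq_true hkd]
        · have hkhi : ¬ ((k:Int) ≤ hi) := fun h => hkd (hhik.1 h)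
          have : ¬ ((k:Int) < filled1) := by rw [hfilled1]; split <;> omega
          rw [if_neg this]
          have hres1k : res1[k]? = res[k]? := by
            rw [hget1, if_neg (by rintro ⟨-, h, -⟩; omega)]
          simp only [decide_eq_false hkd]
          cases h : ts.find? (fun t => decide ((k:Int) ≤ t.2.2)) with
          | none => simp only [hres1k]
          | some u => rfl

-- ===== VERDICT (by name: the statement is the Claim_ definition above) =====
theorem lucky_number_spec : Claim_equal_lucky_number := by
  intro n a _
  show lucky_number n a = lucky_number_alt n a
  simp only [lucky_number, lucky_number_alt]
  rw [show ((PySem.List.enumerate a).foldl bFirstStep (PySem.Dict.empty, [])).2 = dList a from rfl]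
  set size := if n > 0 then n else 0 with hsize
  have hsz0 : 0 ≤ size := by rw [hsize]; split <;> omega
  have hszn : size.toNat = n.toNat := by rw [hsize]; split <;> omega
  have hszc : ((n.toNat : Nat) : Int) = size := by rw [hsize]; split <;> omega
  set P := a.zip (dList a) with hP
  set r := PySem.List.pyRange 0 (a.length : Int) 1 with hr
  have hrlen : r.length = a.length := by rw [hr, PySem.List.length_pyRange_one]; omega
  have hPlen : P.length = a.length := by rw [hP, List.length_zip, dList_length]; omega
  have hsnd : (r.zip P).map Prod.snd = P := List.map_snd_zip (by omega)
  have hrev : (r.zip P).reverse.map Prod.snd = P.reverse := by rw [List.map_reverse, hsnd]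
  apply List.ext_getElem?
  intro k
  by_cases hk : k < n.toNat
  · rw [(aMain n a).2 k hk, PySem.List.pyRepeat_singleton,
      bLoop size ((r.zip P).reverse) (List.replicate size.toNat (-1)) 0 k le_rfl
        (by rw [List.length_replicate]; omega) (by omega),
      if_neg (by omega)]
    have hfind : P.reverse.find? (fun p => decide ((k:Int) ≤ p.2)) =
        ((r.zip P).reverse.find? (fun t => decide ((k:Int) ≤ t.2.2))).map Prod.snd := by
      rw [← hrev, List.find?_map]
      rfl
    rw [cellv_eq_find]
    cases h : (r.zip P).reverse.find? (fun t => decide ((k:Int) ≤ t.2.2)) with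
    | none =>
        rw [hfind, h]
        rw [List.getElem?_replicate, if_pos (by omega)]
        rfl
    | some t =>
        rw [hfind, h]
        rfl
  · rw [List.getElem?_eq_none (by rw [(aMain n a).1]; omega),
      List.getElem?_eq_none (by
        rw [bLoopLen, PySem.List.pyRepeat_singleton, List.length_replicate]; omega)]
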